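-- pv_equiv track=rewrite | github.com/agriculturaana/satirriga-qgis | domain/services/raster_service.py | _extract_tile_name
-- ===== SOURCE A (Python) =====
-- def _extract_tile_name(image_id: str) -> str:
--     """Extrai nome do tile a partir do image_id Sentinel-2.
--
--     Ex: "S2A_MSIL2A_20251022T132231_N0511_R038_T24MXT_20251022T172030"
--         -> "24MXT"
--     """
--     if not image_id:
--         return ""
--     parts = image_id.split("_")
--     for part in parts:
--         if part.startswith("T") and len(part) == 6:
--             return part[1:]  # Remove prefixo "T"
--     return ""
-- ===== SOURCE B (Python) =====
-- def _extract_tile_name(image_id: str) -> str: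
--     """Single left-to-right scan over the raw string: keep the current
--     underscore-delimited segment in an accumulator and test it at each boundary,
--     instead of materialising the full split list first."""
--     cur = ""
--     for ch in image_id + "_":
--         if ch == "_":
--             if len(cur) == 6 and cur[0] == "T":
--                 return cur[1:]
--             cur = ""
--         else:
--             cur += ch
--     return ""
-- ===== Notes on version B (the rewrite author's own statement) =====
-- stated objective: alternative
-- what changed: Replaces the split-on-underscore-then-scan-the-parts-list approach by a single character-level pass that maintains the current segment in an accumulator and tests it at each separator boundary (with a trailing sentinel separator), never building the list of parts.
import Mathlib
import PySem

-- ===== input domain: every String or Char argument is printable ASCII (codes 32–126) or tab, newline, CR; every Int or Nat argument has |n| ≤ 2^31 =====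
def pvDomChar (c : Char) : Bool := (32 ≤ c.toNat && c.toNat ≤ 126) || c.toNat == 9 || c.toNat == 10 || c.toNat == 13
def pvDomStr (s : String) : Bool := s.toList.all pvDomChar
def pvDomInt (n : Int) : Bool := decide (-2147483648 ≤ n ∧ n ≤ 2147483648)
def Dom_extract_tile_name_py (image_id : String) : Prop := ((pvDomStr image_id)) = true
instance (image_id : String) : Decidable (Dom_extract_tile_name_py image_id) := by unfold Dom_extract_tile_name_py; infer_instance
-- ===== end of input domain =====

-- B replaces split('_')-then-scan by one character pass over the raw string; objective: alternative (same cost).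

-- ===== PORT A =====
-- the 'for part in parts' loop with its early return
def pvALoop : List (List Char) → List Char
  | [] => []                                   -- loop fell through: return ""
  | part :: rest =>
    if PySem.Chars.startswith part ['T'] && part.length == 6 then
      PySem.List.slice part (some 1) none      -- part[1:]
    else pvALoop rest

def extract_tile_name_py (image_id : String) : String :=
  if image_id.toList = [] then ""              -- 'if not image_id'
  else String.ofList (pvALoop (PySem.Chars.splitOn image_id.toList ['_']))

-- ===== PORT B =====
-- the 'for ch in image_id + "_"' loop; cur is the current segment in order
-- (cur[0] is ported as pyGet? cur 0 == some 'T'; exact, the access is guarded by len(cur)==6)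
def pvBLoop : List Char → List Char → List Char
  | _, [] => []                                -- loop ended: return ""
  | cur, c :: rest =>
    if c = '_' then
      if cur.length == 6 && (PySem.List.pyGet? cur 0 == some 'T') then
        PySem.List.slice cur (some 1) none     -- cur[1:]
      else pvBLoop [] rest
    else pvBLoop (cur ++ [c]) rest

def extract_tile_name_py_alt (image_id : String) : String :=
  String.ofList (pvBLoop [] (image_id.toList ++ ['_']))   -- image_id + "_" on code points (exact)

-- ===== PRECONDITION & SPEC =====
def Spec_extract_tile_name_py (image_id : String) (out : String) : Prop := out = extract_tile_name_py_alt image_id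
instance (image_id : String) (out : String) : Decidable (Spec_extract_tile_name_py image_id out) := by unfold Spec_extract_tile_name_py; infer_instance

-- ===== CLAIM (what is proved, stated in full; the proofs are below) =====
def Claim_equal_extract_tile_name_py : Prop := ∀ (image_id : String), Dom_extract_tile_name_py image_id → Spec_extract_tile_name_py image_id (extract_tile_name_py image_id)

-- ===== LEMMAS AND PROOFS =====

-- structural description of splitOn on a one-char separator (cur is the current segment, reversed)
def pvSplit : List Char → List Char → List (List Char)
  | cur, [] => [cur.reverse]
  | cur, c :: rest => if c = '_' then cur.reverse :: pvSplit [] rest else pvSplit (c :: cur) rest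

theorem pvSplitOn_go_eq (l : List Char) : ∀ (fuel : Nat) (cur : List Char)
    (acc : List (List Char)), l.length ≤ fuel →
    PySem.Chars.splitOn.go ['_'] fuel l cur acc = acc.reverse ++ pvSplit cur l := by
  induction l with
  | nil =>
    intro fuel cur acc _
    cases fuel with
    | zero => simp [PySem.Chars.splitOn.go.eq_1, pvSplit]
    | succ n => simp [PySem.Chars.splitOn.go.eq_2, pvSplit]
  | cons c rest ih =>
    intro fuel cur acc hfuel
    cases fuel with
    | zero => simp at hfuel
    | succ n =>
      rw [PySem.Chars.splitOn.go.eq_3]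
      by_cases hc : c = '_'
      · subst hc
        rw [if_pos (by simp [List.isPrefixOf])]
        rw [show List.drop ['_'].length ('_' :: rest) = rest from rfl]
        rw [ih n [] _ (by simpa using hfuel)]
        simp [pvSplit]
      · rw [if_neg (by simp [List.isPrefixOf, Ne.symm hc])]
        rw [ih n (c :: cur) acc (by simpa using hfuel)]
        simp [pvSplit, hc]

theorem pvSplitOn_eq (s : List Char) :
    PySem.Chars.splitOn s ['_'] = pvSplit [] s := by
  show PySem.Chars.splitOn.go ['_'] (s.length + 1) s [] [] = _
  rw [pvSplitOn_go_eq s (s.length + 1) [] [] (by omega)]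
  simp

-- the two per-segment conditions agree
theorem pvCond_eq (p : List Char) :
    (PySem.Chars.startswith p ['T'] && p.length == 6)
      = (p.length == 6 && (PySem.List.pyGet? p 0 == some 'T')) := by
  cases p with
  | nil => simp [PySem.Chars.startswith, PySem.List.pyGet?, PySem.List.pyIdx?]
  | cons a q =>
    simp only [PySem.Chars.startswith, List.isPrefixOf, PySem.List.pyGet?_zero_cons,
      List.length_cons]
    rw [BEq.comm, Bool.and_comm]
    simp

-- the B scan computes the A loop over pvSplit
theorem pvLoop_eq (l : List Char) : ∀ (cur : List Char),
    pvBLoop cur.reverse (l ++ ['_']) = pvALoop (pvSplit cur l) := by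
  induction l with
  | nil =>
    intro cur
    simp only [List.nil_append, pvSplit, pvBLoop, pvALoop, if_true]
    rw [pvCond_eq]
  | cons c rest ih =>
    intro cur
    by_cases hc : c = '_'
    · subst hc
      simp only [List.cons_append, pvSplit, pvBLoop, pvALoop, if_true]
      rw [pvCond_eq]
      split
      · rfl
      · simpa using ih []
    · simp only [List.cons_append, pvSplit, pvBLoop, if_neg hc]
      simpa using ih (c :: cur)

-- ===== VERDICT (by name: the statement is the Claim_ definition above) =====
theorem extract_tile_name_py_spec : Claim_equal_extract_tile_name_py := by
  intro image_id _
  unfold Spec_extract_tile_name_py extract_tile_name_py extract_tile_name_py_alt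
  by_cases h : image_id.toList = []
  · rw [if_pos h, h]
    simp [pvBLoop]
  · rw [if_neg h, pvSplitOn_eq, ← pvLoop_eq image_id.toList []]
    rfl
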